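-- pv_equiv track=rewrite | github.com/DaurenAbd/advent-of-code | day_7/solution.py | task1
-- ===== SOURCE A (Python) =====
-- import collections
-- from dataclasses import dataclass
-- from typing import List
--
-- @dataclass(order=True)
-- class CrabGroup1:
--     position: int
--     count: int
--
--     def add(self, count: int):
--         self.count += count
--
--     def move(self, position: int) -> int:
--         move_cost = abs(self.position - position) * self.count
--         self.position = position
--         return move_cost
--
-- def task1(positions: List[int]) -> int:
--     counter = collections.Counter(positions)
--     crabs = [CrabGroup1(position, count) for position, count in counter.items()]
--     crabs.sort()
--     n = len(crabs)
--
--     right_group = CrabGroup1(crabs[n - 1].position, 0)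
--     right_costs = [0] * (n + 1)
--
--     for i in reversed(range(n)):
--         right_costs[i] = right_costs[i + 1] + right_group.move(crabs[i].position)
--         right_group.add(crabs[i].count)
--
--     left_group = CrabGroup1(crabs[0].position, 0)
--     left_costs = [0] * n
--
--     for i in range(1, n):
--         left_group.add(crabs[i - 1].count)
--         left_costs[i] = left_costs[i - 1] + left_group.move(crabs[i].position)
--
--     return min(left_costs[i] + right_costs[i] for i in range(n))
-- ===== SOURCE B (Python) =====
-- def task1(positions):
--     m = sorted(positions)[len(positions) // 2]
--     return sum(abs(x - m) for x in positions)
-- ===== Notes on version B (the rewrite author's own statement) =====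
-- stated objective: faster
-- what changed: Replaces A's counter + sorted crab groups + left/right cost arrays + min-scan by the closed-form optimum: sort once, pick the median element, and sum |x - median| in a single pass.
import Mathlib
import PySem

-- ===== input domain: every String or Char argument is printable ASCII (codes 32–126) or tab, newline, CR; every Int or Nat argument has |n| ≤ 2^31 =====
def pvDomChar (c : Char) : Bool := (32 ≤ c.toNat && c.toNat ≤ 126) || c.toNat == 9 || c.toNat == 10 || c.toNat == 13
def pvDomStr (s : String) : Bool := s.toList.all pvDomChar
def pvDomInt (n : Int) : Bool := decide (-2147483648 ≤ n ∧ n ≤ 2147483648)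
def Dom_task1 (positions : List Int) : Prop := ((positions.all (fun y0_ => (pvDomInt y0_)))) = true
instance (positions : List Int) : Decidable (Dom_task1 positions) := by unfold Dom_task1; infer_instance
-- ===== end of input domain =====

-- B replaces A's counter + sorted crab groups + left/right cost arrays + min-scan by the
-- closed-form optimum: sort once, pick the median element, sum |x - median| in one pass (faster).

-- ===== PORT A =====
-- the reversed(range(n)) loop: builds right_costs back to front; state = (costs so far, right_group.position, right_group.count)
def task1RightGo : List (Int × Int) → (List Int × Int × Int)
  | [] => ([0], 0, 0)
  | c :: rest =>
    let r := task1RightGo rest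
    ((r.1.headD 0 + |r.2.1 - c.1| * r.2.2) :: r.1, c.1, r.2.2 + c.2)

-- the range(1, n) loop; state = (left_group.position, left_group.count, left_costs[i-1])
def task1LeftGo : List (Int × Int) → Int → Int → Int → List Int
  | [], _, _, _ => []
  | c :: rest, gp, gc, last =>
    let cost := last + |gp - c.1| * gc
    cost :: task1LeftGo rest c.1 (gc + c.2) cost

def task1Left : List (Int × Int) → List Int
  | [] => []
  | c0 :: rest => 0 :: task1LeftGo rest c0.1 c0.2 0

def task1 (positions : List Int) : Int :=
  let counter := PySem.Dict.counter positions
  let crabs := PySem.List.sorted2 counter.items (fun c => c.1) (fun c => c.2)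
  let rightCosts := (task1RightGo crabs).1
  let leftCosts := task1Left crabs
  match PySem.List.min? (List.zipWith (· + ·) leftCosts rightCosts) (fun x => x) with
  | some v => v
  | none => 0   -- unreachable under Pre_ (Python raises IndexError on [])

-- ===== PORT B =====
def task1_alt (positions : List Int) : Int :=
  match PySem.List.pyGet? (PySem.List.sorted positions (fun x => x))
      (PySem.Int.floordiv (positions.length : Int) 2) with
  | some m => positions.foldl (fun acc x => acc + |x - m|) 0
  | none => 0   -- unreachable under Pre_ (Python raises IndexError on [])

-- ===== PRECONDITION & SPEC =====
-- Pre_ excludes exactly the empty list, on which the Python A raises IndexError (crabs[n-1]).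
def Pre_task1 (positions : List Int) : Prop := positions ≠ []
instance (positions : List Int) : Decidable (Pre_task1 positions) := by unfold Pre_task1; infer_instance

def pvWitness_task1 : List Int := [16, 1, 2, 0, 4, 2, 7, 1, 2, 14]

def Spec_task1 (positions : List Int) (out : Int) : Prop := out = task1_alt positions
instance (positions : List Int) (out : Int) : Decidable (Spec_task1 positions out) := by unfold Spec_task1; infer_instance

-- ===== CLAIM (what is proved, stated in full; the proofs are below) =====
def Claim_equal_task1 : Prop := ∀ (positions : List Int), Dom_task1 positions → Pre_task1 positions → Spec_task1 positions (task1 positions)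

-- ===== LEMMAS AND PROOFS =====

-- abbreviations for the proof: weighted count, weighted position sum, weighted / plain L1 cost
def pvSC (cs : List (Int × Int)) : Int := (cs.map (fun c => c.2)).sum
def pvSP (cs : List (Int × Int)) : Int := (cs.map (fun c => c.2 * c.1)).sum
def pvAcost (cs : List (Int × Int)) (q : Int) : Int := (cs.map (fun c => c.2 * |c.1 - q|)).sum
def pvFcost (l : List Int) (q : Int) : Int := (l.map (fun x => |x - q|)).sum

-- closed form of A's right_costs array
def pvRcosts : List (Int × Int) → List Int
  | [] => [0]
  | c :: r => (pvSP r - c.1 * pvSC r) :: pvRcosts r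

theorem pvRcosts_headD (cs : List (Int × Int)) :
    (pvRcosts cs).headD 0 = match cs with | [] => 0 | c :: r => pvSP r - c.1 * pvSC r := by
  cases cs <;> rfl

theorem pvAcost_of_le (r : List (Int × Int)) (q : Int) (h : ∀ d ∈ r, q ≤ d.1) :
    pvAcost r q = pvSP r - q * pvSC r := by
  induction r with
  | nil => simp [pvAcost, pvSP, pvSC]
  | cons d r ih =>
    have hd : q ≤ d.1 := h d (by simp)
    have : |d.1 - q| = d.1 - q := abs_of_nonneg (by omega)
    simp only [pvAcost, pvSP, pvSC, List.map_cons, List.sum_cons] at *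
    rw [this, ih (fun x hx => h x (by simp [hx]))]
    ring

theorem task1RightGo_spec (cs : List (Int × Int)) (hs : cs.Pairwise (fun a b => a.1 ≤ b.1)) :
    task1RightGo cs = (pvRcosts cs, (match cs with | [] => 0 | c :: _ => c.1), pvSC cs) := by
  induction cs with
  | nil => simp [task1RightGo, pvRcosts, pvSC]
  | cons c rest ih =>
    have hrest := (List.pairwise_cons.mp hs).2
    have hle : ∀ d ∈ rest, c.1 ≤ d.1 := (List.pairwise_cons.mp hs).1
    rw [task1RightGo, ih hrest]
    simp only [pvRcosts]
    refine Prod.ext ?_ (Prod.ext ?_ ?_) <;> simp only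
    · congr 1
      rw [pvRcosts_headD]
      cases rest with
      | nil => simp [pvSP, pvSC]
      | cons d r2 =>
        have : |d.1 - c.1| = d.1 - c.1 := abs_of_nonneg (by have := hle d (by simp); omega)
        simp only [pvSP, pvSC, List.map_cons, List.sum_cons] at *
        rw [this]; ring
    · simp [pvSC]; ring

theorem task1LeftGo_zip (cs : List (Int × Int)) (gp gc last : Int)
    (hs : cs.Pairwise (fun a b => a.1 ≤ b.1)) (hgp : ∀ c ∈ cs, gp ≤ c.1) :
    List.zipWith (· + ·) (task1LeftGo cs gp gc last) (pvRcosts cs)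
      = cs.map (fun c => last + gc * (c.1 - gp) + pvAcost cs c.1) := by
  induction cs generalizing gp gc last with
  | nil => rfl
  | cons c rest ih =>
    have hrest := (List.pairwise_cons.mp hs).2
    have hle : ∀ d ∈ rest, c.1 ≤ d.1 := (List.pairwise_cons.mp hs).1
    have habs : |gp - c.1| = c.1 - gp := by
      have := hgp c (by simp); rw [abs_of_nonpos (by omega)]; ring
    rw [task1LeftGo, pvRcosts]
    simp only [List.zipWith_cons_cons, List.map_cons]
    refine List.cons_eq_cons.mpr ⟨?_, ?_⟩
    · rw [habs]
      have h1 : pvAcost (c :: rest) c.1 = pvAcost rest c.1 := by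
        simp [pvAcost]
      rw [h1, pvAcost_of_le rest c.1 hle]; ring
    · rw [ih c.1 (gc + c.2) (last + |gp - c.1| * gc) hrest hle]
      apply List.map_congr_left
      intro d hd
      have hcd : c.1 ≤ d.1 := hle d hd
      have : pvAcost (c :: rest) d.1 = c.2 * (d.1 - c.1) + pvAcost rest d.1 := by
        simp only [pvAcost, List.map_cons, List.sum_cons]
        rw [abs_of_nonpos (by omega : c.1 - d.1 ≤ 0)]; ring
      rw [habs, this]; ring

-- the zipped totals of A are exactly the weighted cost at every crab position
theorem task1_zip_spec (crabs : List (Int × Int)) (hs : crabs.Pairwise (fun a b => a.1 ≤ b.1)) :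
    List.zipWith (· + ·) (task1Left crabs) (task1RightGo crabs).1
      = crabs.map (fun c => pvAcost crabs c.1) := by
  cases crabs with
  | nil => rfl
  | cons c0 rest =>
    have hrest := (List.pairwise_cons.mp hs).2
    have hle : ∀ d ∈ rest, c0.1 ≤ d.1 := (List.pairwise_cons.mp hs).1
    rw [task1RightGo_spec _ hs]
    rw [task1Left, pvRcosts]
    simp only [List.zipWith_cons_cons, List.map_cons, zero_add]
    refine List.cons_eq_cons.mpr ⟨?_, ?_⟩
    · rw [pvAcost_of_le (c0 :: rest) c0.1 (by
        intro d hd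
        rcases List.mem_cons.mp hd with h | h
        · simp [h]
        · exact hle d h)]
      simp only [pvSP, pvSC, List.map_cons, List.sum_cons]; ring
    · rw [task1LeftGo_zip rest c0.1 c0.2 0 hrest hle]
      apply List.map_congr_left
      intro d hd
      have hcd : c0.1 ≤ d.1 := hle d hd
      have : pvAcost (c0 :: rest) d.1 = c0.2 * (d.1 - c0.1) + pvAcost rest d.1 := by
        simp only [pvAcost, List.map_cons, List.sum_cons]
        rw [abs_of_nonpos (by omega : c0.1 - d.1 ≤ 0)]; ring
      rw [this]; ring

-- insertion sort with an asymmetric + transitive 'before' yields Pairwise (no later element before an earlier)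
theorem pvInsertBy_pairwise {α : Type} (before : α → α → Bool)
    (htr : ∀ a b c, before a b = true → before b c = true → before a c = true)
    (has : ∀ a b, before a b = true → before b a = false)
    (x : α) (acc : List α) (hp : acc.Pairwise (fun a b => before b a = false)) :
    (PySem.List.insertBy before x acc).Pairwise (fun a b => before b a = false) := by
  induction acc with
  | nil => simp [PySem.List.insertBy]
  | cons y ys ih =>
    rw [PySem.List.insertBy]
    by_cases hxy : before x y = true
    · simp only [hxy, if_true]
      refine List.pairwise_cons.mpr ⟨?_, hp⟩
      intro z hz
      rcases List.mem_cons.mp hz with h | h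
      · subst h; exact has _ _ hxy
      · by_contra hzx
        have hzx' : before z x = true := by
          revert hzx; cases before z x <;> simp
        have hzy : before z y = true := htr _ _ _ hzx' hxy
        have := (List.pairwise_cons.mp hp).1 z h
        simp_all
    · simp only [hxy]
      refine List.pairwise_cons.mpr ⟨?_, ih (List.pairwise_cons.mp hp).2⟩
      intro z hz
      rcases (PySem.List.mem_insertBy before x z ys).mp hz with h | h
      · rw [h]; revert hxy; cases before x y <;> simp
      · exact (List.pairwise_cons.mp hp).1 z h

theorem pvSortFold_pairwise {α : Type} (before : α → α → Bool)
    (htr : ∀ a b c, before a b = true → before b c = true → before a c = true)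
    (has : ∀ a b, before a b = true → before b a = false)
    (xs : List α) (acc : List α) (hp : acc.Pairwise (fun a b => before b a = false)) :
    (xs.foldl (fun acc x => PySem.List.insertBy before x acc) acc).Pairwise
      (fun a b => before b a = false) := by
  induction xs generalizing acc with
  | nil => exact hp
  | cons x xs ih => exact ih _ (pvInsertBy_pairwise before htr has x acc hp)

-- sorted2 of a list with pairwise-distinct first keys is strictly increasing in the first key
theorem pvSorted2_pairwise_lt (xs : List (Int × Int))
    (hnd : (xs.map (fun c => c.1)).Nodup) :
    (PySem.List.sorted2 xs (fun c => c.1) (fun c => c.2)).Pairwise (fun a b => a.1 < b.1) := by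
  have hperm : (PySem.List.sorted2 xs (fun c => c.1) (fun c => c.2)).Perm xs :=
    PySem.List.sorted2_perm xs _ _ false
  set before : (Int × Int) → (Int × Int) → Bool :=
    fun a b => decide (a.1 < b.1) || !decide (b.1 < a.1) && decide (a.2 < b.2) with hbdef
  have hpw : (PySem.List.sorted2 xs (fun c => c.1) (fun c => c.2)).Pairwise
      (fun a b => before b a = false) := by
    apply pvSortFold_pairwise before
    · intro a b c h1 h2
      simp only [hbdef, Bool.or_eq_true, Bool.and_eq_true, decide_eq_true_eq,
        Bool.not_eq_true', decide_eq_false_iff_not] at h1 h2 ⊢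
      omega
    · intro a b h
      by_contra hba
      have hba' : before b a = true := by
        revert hba; cases before b a <;> simp
      simp only [hbdef, Bool.or_eq_true, Bool.and_eq_true, decide_eq_true_eq,
        Bool.not_eq_true', decide_eq_false_iff_not] at h hba'
      omega
    · exact List.Pairwise.nil
  have hnd' : ((PySem.List.sorted2 xs (fun c => c.1) (fun c => c.2)).map (fun c => c.1)).Nodup :=
    (hperm.map (fun c => c.1)).nodup_iff.mpr hnd
  have hpw2 : (PySem.List.sorted2 xs (fun c => c.1) (fun c => c.2)).Pairwise
      (fun a b => a.1 ≠ b.1) := List.pairwise_map.mp hnd'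
  refine (hpw.and hpw2).imp ?_
  rintro a b ⟨h1, h2⟩
  have hnb : ¬ (b.1 < a.1) := by
    intro hlt
    rw [hbdef] at h1
    simp [hlt] at h1
  omega

-- sum(abs(x - m) for x in l) as a fold
theorem pvFoldAbs (l : List Int) (m a : Int) :
    l.foldl (fun acc x => acc + |x - m|) a = a + pvFcost l m := by
  induction l generalizing a with
  | nil => simp [pvFcost]
  | cons x t ih =>
    simp only [List.foldl_cons, pvFcost, List.map_cons, List.sum_cons] at *
    rw [ih]; ring

-- a weighted sum over a nodup index list, with one count bumped
theorem pvCountSum_aux (g : Int → Int) (x : Int) (c : Int → Int) (S : List Int) (hS : S.Nodup) :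
    (S.map (fun k => (c k + (if k = x then 1 else 0)) * g k)).sum
      = (S.map (fun k => c k * g k)).sum + (if x ∈ S then g x else 0) := by
  induction S with
  | nil => simp
  | cons s S ih =>
    have hs : s ∉ S := (List.nodup_cons.mp hS).1
    have ih' := ih (List.nodup_cons.mp hS).2
    simp only [List.map_cons, List.sum_cons, List.mem_cons]
    by_cases hsx : s = x
    · subst hsx
      simp [ih', hs]
      ring
    · have : (if s = x then (1:Int) else 0) = 0 := if_neg hsx
      rw [this, ih']
      by_cases hxS : x ∈ S
      · simp only [if_pos hxS, if_pos (Or.inr hxS)]; ring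
      · have : ¬ (x = s ∨ x ∈ S) := by
          rintro (h | h)
          · exact hsx h.symm
          · exact hxS h
        simp only [if_neg hxS, if_neg this]; ring

-- Counter reconstruction: sum over distinct keys weighted by counts = plain sum
theorem pvCountSum (g : Int → Int) (l : List Int) :
    ((PySem.Set.ofList l).map (fun k => ((l.count k : Int)) * g k)).sum = (l.map g).sum := by
  induction l using List.reverseRecOn with
  | nil => simp [PySem.Set.ofList]
  | append_singleton t x ih =>
    have hof : PySem.Set.ofList (t ++ [x]) = PySem.Set.add (PySem.Set.ofList t) x := by
      rw [PySem.Set.ofList_eq_foldl, List.foldl_append, ← PySem.Set.ofList_eq_foldl]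
      rfl
    have hcnt : ∀ k : Int, ((t ++ [x]).count k : Int) = (t.count k : Int) + (if k = x then 1 else 0) := by
      intro k
      rw [List.count_append, List.count_singleton]
      by_cases h : k = x
      · subst h; simp
      · have : (x == k) = false := by simp [Ne.symm h]
        simp [this, h]
    rw [hof]
    by_cases hx : x ∈ PySem.Set.ofList t
    · have hadd : PySem.Set.add (PySem.Set.ofList t) x = PySem.Set.ofList t := by
        simp only [PySem.Set.add]
        rw [if_pos ((PySem.Set.contains_iff _ x).mpr hx)]
      rw [hadd]
      have := pvCountSum_aux g x (fun k => (t.count k : Int)) (PySem.Set.ofList t)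
        (PySem.Set.nodup_ofList t)
      calc ((PySem.Set.ofList t).map (fun k => (((t ++ [x]).count k : Int)) * g k)).sum
          = ((PySem.Set.ofList t).map (fun k => ((t.count k : Int) + (if k = x then 1 else 0)) * g k)).sum := by
            apply congrArg
            exact List.map_congr_left (fun k _ => by rw [hcnt k])
        _ = ((PySem.Set.ofList t).map (fun k => (t.count k : Int) * g k)).sum + g x := by
            rw [this, if_pos hx]
        _ = ((t ++ [x]).map g).sum := by rw [ih]; simp
    · have hadd : PySem.Set.add (PySem.Set.ofList t) x = PySem.Set.ofList t ++ [x] := by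
        simp only [PySem.Set.add]
        rw [if_neg (fun hc => hx ((PySem.Set.contains_iff _ x).mp hc))]
      have hxt : x ∉ t := fun h => hx ((PySem.Set.mem_ofList t x).mpr h)
      have hcx : t.count x = 0 := List.count_eq_zero.mpr hxt
      rw [hadd]
      have := pvCountSum_aux g x (fun k => (t.count k : Int)) (PySem.Set.ofList t)
        (PySem.Set.nodup_ofList t)
      calc ((PySem.Set.ofList t ++ [x]).map (fun k => (((t ++ [x]).count k : Int)) * g k)).sum
          = ((PySem.Set.ofList t).map (fun k => (((t ++ [x]).count k : Int)) * g k)).sum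
              + ((t ++ [x]).count x : Int) * g x := by simp
        _ = ((PySem.Set.ofList t).map (fun k => ((t.count k : Int) + (if k = x then 1 else 0)) * g k)).sum
              + ((t ++ [x]).count x : Int) * g x := by
            apply congrArg (· + ((t ++ [x]).count x : Int) * g x)
            exact congrArg _ (List.map_congr_left (fun k _ => by rw [hcnt k]))
        _ = ((PySem.Set.ofList t).map (fun k => (t.count k : Int) * g k)).sum + g x := by
            rw [this, if_neg hx, hcnt x, hcx]
            simp
        _ = ((t ++ [x]).map g).sum := by rw [ih]; simp

-- the weighted cost over the counter's items is the plain cost over the list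
theorem pvAcost_counter (l : List Int) (q : Int) :
    pvAcost ((PySem.Dict.counter l).items) q = pvFcost l q := by
  rw [PySem.Dict.items_counter]
  unfold pvAcost pvFcost
  rw [List.map_map]
  have : ((fun c : Int × Int => c.2 * |c.1 - q|) ∘ (fun k => (k, (l.count k : Int))))
      = fun k => (l.count k : Int) * |k - q| := rfl
  rw [this]
  exact pvCountSum (fun k => |k - q|) l

-- per-element lower bounds summed: moving right of m
theorem pvMedLB1 (l : List Int) (m p : Int) (h : m ≤ p) :
    (p - m) * (l.countP (fun x => decide (x ≤ m)) : Int)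
      - (p - m) * ((l.countP (fun x => !decide (x ≤ m))) : Int)
      ≤ pvFcost l p - pvFcost l m := by
  induction l with
  | nil => simp [pvFcost]
  | cons x t ih =>
    simp only [pvFcost, List.map_cons, List.sum_cons, List.countP_cons] at *
    by_cases hx : x ≤ m
    · have e1 : |x - p| = p - x := by rw [abs_of_nonpos (by omega)]; ring
      have e2 : |x - m| = m - x := by rw [abs_of_nonpos (by omega)]; ring
      rw [e1, e2]
      simp only [hx, decide_true, Bool.not_true, if_true, Bool.false_eq_true, if_false]
      push_cast
      nlinarith [ih]
    · have e3 : |x - m| - |x - p| ≤ p - m := by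
        have h1 := abs_sub_abs_le_abs_sub (x - m) (x - p)
        have h2 : (x - m) - (x - p) = p - m := by ring
        rw [h2, abs_of_nonneg (by omega : (0:Int) ≤ p - m)] at h1
        exact h1
      simp only [hx, decide_false, Bool.not_false, if_true, Bool.false_eq_true, if_false]
      push_cast
      ring_nf
      ring_nf at ih e3
      nlinarith [ih, e3]

-- per-element lower bounds summed: moving left of m
theorem pvMedLB2 (l : List Int) (m p : Int) (h : p ≤ m) :
    (m - p) * (l.countP (fun x => decide (m ≤ x)) : Int)
      - (m - p) * ((l.countP (fun x => !decide (m ≤ x))) : Int)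
      ≤ pvFcost l p - pvFcost l m := by
  induction l with
  | nil => simp [pvFcost]
  | cons x t ih =>
    simp only [pvFcost, List.map_cons, List.sum_cons, List.countP_cons] at *
    by_cases hx : m ≤ x
    · have e1 : |x - p| = x - p := by rw [abs_of_nonneg (by omega)]
      have e2 : |x - m| = x - m := by rw [abs_of_nonneg (by omega)]
      rw [e1, e2]
      simp only [hx, decide_true, Bool.not_true, if_true, Bool.false_eq_true, if_false]
      push_cast
      nlinarith [ih]
    · have e3 : |x - m| - |x - p| ≤ m - p := by
        have h1 := abs_sub_abs_le_abs_sub (x - m) (x - p)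
        have h2 : (x - m) - (x - p) = p - m := by ring
        rw [h2, abs_of_nonpos (by omega : p - m ≤ (0:Int))] at h1
        omega
      simp only [hx, decide_false, Bool.not_false, if_true, Bool.false_eq_true, if_false]
      push_cast
      ring_nf
      ring_nf at ih e3
      nlinarith [ih, e3]

theorem pvCountP_not (l : List Int) (q : Int → Bool) :
    l.countP (fun x => !q x) = l.length - l.countP q := by
  induction l with
  | nil => simp
  | cons x t ih =>
    simp only [List.countP_cons, List.length_cons, ih]
    have := List.countP_le_length (p := q) (l := t)
    rcases hq : q x
    · simp
      omega
    · simp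

theorem pvCount_le_half (s : List Int) (hs : s.Pairwise (· ≤ ·)) (k : Nat) (hk : k < s.length) :
    k + 1 ≤ s.countP (fun x => decide (x ≤ s[k])) := by
  have hsplit : s = s.take (k+1) ++ s.drop (k+1) := (List.take_append_drop (k+1) s).symm
  have hlen : (s.take (k+1)).length = k + 1 := by simp [List.length_take]; omega
  set m := s[k] with hm
  have hall : ∀ x ∈ s.take (k+1), decide (x ≤ m) = true := by
    intro x hx
    obtain ⟨i, hi, hix⟩ := List.getElem_of_mem hx
    rw [List.getElem_take] at hix
    have hik : i ≤ k := by rw [hlen] at hi; omega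
    have : s[i] ≤ s[k] := by
      rcases Nat.lt_or_ge i k with h | h
      · exact (List.pairwise_iff_getElem.mp hs) i k (by omega) hk h
      · have : i = k := by omega
        subst this; exact le_refl _
    rw [← hix, hm]
    simp [this]
  have h1 : (s.take (k+1)).countP (fun x => decide (x ≤ m)) = k + 1 :=
    (List.countP_eq_length.mpr hall).trans hlen
  have h2 : s.countP (fun x => decide (x ≤ m))
      = (s.take (k+1)).countP (fun x => decide (x ≤ m))
        + (s.drop (k+1)).countP (fun x => decide (x ≤ m)) := by
    conv_lhs => rw [hsplit]
    exact List.countP_append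
  omega

theorem pvCount_ge_half (s : List Int) (hs : s.Pairwise (· ≤ ·)) (k : Nat) (hk : k < s.length) :
    s.length - k ≤ s.countP (fun x => decide (s[k] ≤ x)) := by
  have hsplit : s = s.take k ++ s.drop k := (List.take_append_drop k s).symm
  have hlen : (s.drop k).length = s.length - k := by simp
  set m := s[k] with hm
  have hall : ∀ x ∈ s.drop k, decide (m ≤ x) = true := by
    intro x hx
    obtain ⟨i, hi, hix⟩ := List.getElem_of_mem hx
    rw [List.getElem_drop] at hix
    have : s[k] ≤ s[k + i] := by
      rcases Nat.eq_zero_or_pos i with h | h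
      · subst h; simp
      · exact (List.pairwise_iff_getElem.mp hs) k (k + i) hk (by rw [hlen] at hi; omega) (by omega)
    rw [← hix, hm]
    simp [this]
  have h1 : (s.drop k).countP (fun x => decide (m ≤ x)) = s.length - k :=
    (List.countP_eq_length.mpr hall).trans hlen
  have h2 : s.countP (fun x => decide (m ≤ x))
      = (s.take k).countP (fun x => decide (m ≤ x))
        + (s.drop k).countP (fun x => decide (m ≤ x)) := by
    conv_lhs => rw [hsplit]
    exact List.countP_append
  omega

-- the median minimizes the L1 cost among all points of the list
theorem pvMedian_min (l : List Int) (hl : l ≠ []) (p : Int) :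
    pvFcost l ((PySem.List.sorted l (fun x => x))[l.length / 2]'(by
      rw [PySem.List.length_sorted]
      have : 0 < l.length := List.length_pos_iff.mpr hl
      omega)) ≤ pvFcost l p := by
  have hn : 0 < l.length := List.length_pos_iff.mpr hl
  have hk : l.length / 2 < (PySem.List.sorted l (fun x => x)).length := by
    rw [PySem.List.length_sorted]; omega
  set sl := PySem.List.sorted l (fun x => x) with hsl
  set m := sl[l.length / 2]'hk with hm
  have hspw : sl.Pairwise (· ≤ ·) := PySem.List.sorted_pairwise l (fun x => x)
  have hperm : sl.Perm l := PySem.List.sorted_perm l (fun x => x) false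
  have hslen : sl.length = l.length := PySem.List.length_sorted l (fun x => x) false
  -- counts
  have hc1 : l.length / 2 + 1 ≤ sl.countP (fun x => decide (x ≤ m)) :=
    pvCount_le_half sl hspw (l.length / 2) hk
  have hc2 : sl.length - l.length / 2 ≤ sl.countP (fun x => decide (m ≤ x)) :=
    pvCount_ge_half sl hspw (l.length / 2) hk
  have hcp1 : l.countP (fun x => decide (x ≤ m)) = sl.countP (fun x => decide (x ≤ m)) :=
    (hperm.countP_eq _).symm
  have hcp2 : l.countP (fun x => decide (m ≤ x)) = sl.countP (fun x => decide (m ≤ x)) :=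
    (hperm.countP_eq _).symm
  rcases le_total m p with hmp | hpm
  · have hlb := pvMedLB1 l m p hmp
    have hnot := pvCountP_not l (fun x => decide (x ≤ m))
    have hlelen := List.countP_le_length (p := fun x => decide (x ≤ m)) (l := l)
    have hfac : 0 ≤ (p - m) *
        ((l.countP (fun x => decide (x ≤ m)) : Int) - (l.countP (fun x => !decide (x ≤ m)) : Int)) := by
      apply mul_nonneg (by omega)
      omega
    have hexp : (p - m) *
        ((l.countP (fun x => decide (x ≤ m)) : Int) - (l.countP (fun x => !decide (x ≤ m)) : Int))
        = (p - m) * (l.countP (fun x => decide (x ≤ m)) : Int)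
          - (p - m) * (l.countP (fun x => !decide (x ≤ m)) : Int) := by ring
    linarith [hlb]
  · have hlb := pvMedLB2 l m p hpm
    have hnot := pvCountP_not l (fun x => decide (m ≤ x))
    have hlelen := List.countP_le_length (p := fun x => decide (m ≤ x)) (l := l)
    have hfac : 0 ≤ (m - p) *
        ((l.countP (fun x => decide (m ≤ x)) : Int) - (l.countP (fun x => !decide (m ≤ x)) : Int)) := by
      apply mul_nonneg (by omega)
      omega
    have hexp : (m - p) *
        ((l.countP (fun x => decide (m ≤ x)) : Int) - (l.countP (fun x => !decide (m ≤ x)) : Int))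
        = (m - p) * (l.countP (fun x => decide (m ≤ x)) : Int)
          - (m - p) * (l.countP (fun x => !decide (m ≤ x)) : Int) := by ring
    linarith [hlb]

-- ===== VERDICT (by name: the statement is the Claim_ definition above) =====
theorem task1_spec : Claim_equal_task1 := by
  unfold Claim_equal_task1
  intro positions _hdom hpre
  unfold Spec_task1 task1 task1_alt
  have hpos : positions ≠ [] := hpre
  have hn : 0 < positions.length := List.length_pos_iff.mpr hpos
  set items := (PySem.Dict.counter positions).items with hitems
  set crabs := PySem.List.sorted2 items (fun c => c.1) (fun c => c.2) with hcrabs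
  have hkeysnodup : (items.map (fun c => c.1)).Nodup := by
    have h1 := PySem.Dict.nodup_keys_counter positions
    simpa [PySem.Dict.keys, hitems] using h1
  have hlt : crabs.Pairwise (fun a b => a.1 < b.1) := pvSorted2_pairwise_lt items hkeysnodup
  have hle : crabs.Pairwise (fun a b => a.1 ≤ b.1) := hlt.imp (fun h => le_of_lt h)
  have hperm : crabs.Perm items := PySem.List.sorted2_perm items _ _ false
  have hAc : ∀ q, pvAcost crabs q = pvFcost positions q := by
    intro q
    have h1 : pvAcost crabs q = pvAcost items q := by
      unfold pvAcost
      exact (hperm.map _).sum_eq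
    rw [h1, hitems, pvAcost_counter]
  -- the B side
  have hk : positions.length / 2 < (PySem.List.sorted positions (fun x => x)).length := by
    rw [PySem.List.length_sorted]; omega
  set sl := PySem.List.sorted positions (fun x => x) with hsl
  set m := sl[positions.length / 2]'hk with hm
  have hfd : PySem.Int.floordiv (positions.length : Int) 2 = ((positions.length / 2 : Nat) : Int) := by
    unfold PySem.Int.floordiv
    rw [Int.fdiv_eq_ediv]
    simp
  rw [hfd, PySem.List.pyGet?_natCast, List.getElem?_eq_getElem hk]
  have hmmem : m ∈ positions := by
    have h1 : m ∈ sl := List.getElem_mem _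
    exact ((PySem.List.sorted_perm positions (fun x => x) false).mem_iff).mp h1
  -- the A side: zeta-reduce the let-bindings of the port (definitional)
  show (match PySem.List.min? (List.zipWith (fun x1 x2 => x1 + x2) (task1Left crabs) (task1RightGo crabs).1) (fun x => x) with
        | some v => v
        | none => 0)
      = (match some (sl[positions.length / 2]'hk) with
        | some m => List.foldl (fun acc x => acc + |x - m|) 0 positions
        | none => 0)
  rw [task1_zip_spec crabs hle]
  have hmapeq : crabs.map (fun c => pvAcost crabs c.1) = crabs.map (fun c => pvFcost positions c.1) :=
    List.map_congr_left (fun c _ => hAc c.1)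
  rw [hmapeq]
  have hitemsForm := PySem.Dict.items_counter positions
  have hcne : crabs ≠ [] := by
    intro h
    have hlen0 : items.length = 0 := by
      have hl := hperm.length_eq
      rw [h] at hl
      exact hl.symm ▸ rfl
    have hinil : items = [] := List.eq_nil_of_length_eq_zero hlen0
    rw [hitems, hitemsForm] at hinil
    have hofnil : PySem.Set.ofList positions = [] := List.map_eq_nil_iff.mp hinil
    rcases positions with _ | ⟨x, t⟩
    · exact hpos rfl
    · have hx : x ∈ PySem.Set.ofList (x :: t) :=
        (PySem.Set.mem_ofList (x :: t) x).mpr (by simp)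
      rw [hofnil] at hx
      cases hx
  rcases hmv : PySem.List.min? (crabs.map (fun c => pvFcost positions c.1)) (fun x => x) with _ | v
  · exfalso
    have := (PySem.List.min?_eq_none_iff _ _).mp hmv
    exact hcne (List.map_eq_nil_iff.mp this)
  · rw [hmv]
    show v = positions.foldl (fun acc x => acc + |x - m|) 0
    rw [pvFoldAbs]
    have le1 : pvFcost positions m ≤ v := by
      have hv := PySem.List.min?_mem hmv
      obtain ⟨c, hc, hcv⟩ := List.mem_map.mp hv
      have hcitems : c ∈ items := hperm.subset hc
      have hc1 : c.1 ∈ positions := by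
        rw [hitems, hitemsForm] at hcitems
        obtain ⟨kk, hkk, hkc⟩ := List.mem_map.mp hcitems
        have hck : c.1 = kk := by rw [← hkc]
        rw [hck]
        exact (PySem.Set.mem_ofList positions kk).mp hkk
      rw [← hcv]
      exact pvMedian_min positions hpos c.1
    have le2 : v ≤ pvFcost positions m := by
      have hmin := PySem.List.min?_isMin hmv
      have hmemS : m ∈ PySem.Set.ofList positions := (PySem.Set.mem_ofList positions m).mpr hmmem
      have hitem : (m, (positions.count m : Int)) ∈ items := by
        rw [hitems, hitemsForm]
        exact List.mem_map.mpr ⟨m, hmemS, rfl⟩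
      have hcrab : (m, (positions.count m : Int)) ∈ crabs := hperm.mem_iff.mpr hitem
      have hmem2 : pvFcost positions m ∈ crabs.map (fun c => pvFcost positions c.1) :=
        List.mem_map.mpr ⟨_, hcrab, rfl⟩
      exact hmin _ hmem2
    omega
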